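-- pv_equiv track=rewrite | github.com/geldata/gel-python | tests/nested_collections.py | increment_indexes
-- ===== SOURCE A (Python) =====
-- import abc
-- import typing
--
-- class NonStrSequence(abc.ABC):
--     @classmethod
--     def __subclasshook__(cls, C):
--         # not possible to do with AnyStr
--         if issubclass(C, (str, bytes)):
--             return NotImplemented
--         else:
--             return issubclass(C, typing.Sequence)
--
--     @abc.abstractmethod
--     def dummy(self):
--         # ruff complains if we don't have an abstract method
--         pass
--
-- def first_indexes(
--     collection: typing.Sequence[typing.Any],
-- ) -> list[int]:
--     if not collection:
--         return []
--     if isinstance(collection[0], NonStrSequence):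
--         return [0] + first_indexes(collection[0])
--     else:
--         return [0]
--
-- def increment_indexes(
--     collection: typing.Sequence[typing.Any],
--     indexes: list[int],
-- ) -> list[int]:
--     # Iterate through all indexes, with children taking priority.
--     #
--     # eg. Iterating over ((0, 1), (2, 3)) will produce:
--     # - [0, 0]
--     # - [0, 1]
--     # - [0]
--     # - [1, 0]
--     # - [1, 1]
--     # - [1]
--     assert indexes
--
--     if len(indexes) > 1:
--         return indexes[:1] + increment_indexes(
--             collection[indexes[0]], indexes[1:]
--         )
--
--     elif len(indexes) == 1:
--         next_index = indexes[0] + 1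
--         if next_index >= len(collection):
--             return []
--
--         return [next_index] + (
--             first_indexes(collection[next_index])
--             if isinstance(collection[next_index], NonStrSequence)
--             else []
--         )
--
--     else:
--         raise RuntimeError
-- ===== SOURCE B (Python) =====
-- import abc
-- import typing
--
-- class NonStrSequence(abc.ABC):
--     @classmethod
--     def __subclasshook__(cls, C):
--         if issubclass(C, (str, bytes)):
--             return NotImplemented
--         else:
--             return issubclass(C, typing.Sequence)
--
--     @abc.abstractmethod
--     def dummy(self):
--         pass
--
-- def first_indexes(
--     collection: typing.Sequence[typing.Any],
-- ) -> list[int]: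
--     if not collection:
--         return []
--     if isinstance(collection[0], NonStrSequence):
--         return [0] + first_indexes(collection[0])
--     else:
--         return [0]
--
-- def increment_indexes(
--     collection: typing.Sequence[typing.Any],
--     indexes: list[int],
-- ) -> list[int]:
--     # Iterative: descend once to the parent of the last index, then do a
--     # single increment step there (no depth recursion).
--     assert indexes
--     col = collection
--     for i in indexes[:-1]:
--         col = col[i]
--     nxt = indexes[-1] + 1
--     if nxt >= len(col):
--         return indexes[:-1]
--     child = col[nxt]
--     tail = first_indexes(child) if isinstance(child, NonStrSequence) else []
--     return indexes[:-1] + [nxt] + tail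
-- ===== Notes on version B (the rewrite author's own statement) =====
-- stated objective: alternative
-- what changed: Replaces A's depth recursion (re-calling increment_indexes on the child collection) with a single iterative descent loop to the parent of the last index followed by one increment step there.
import Mathlib
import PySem

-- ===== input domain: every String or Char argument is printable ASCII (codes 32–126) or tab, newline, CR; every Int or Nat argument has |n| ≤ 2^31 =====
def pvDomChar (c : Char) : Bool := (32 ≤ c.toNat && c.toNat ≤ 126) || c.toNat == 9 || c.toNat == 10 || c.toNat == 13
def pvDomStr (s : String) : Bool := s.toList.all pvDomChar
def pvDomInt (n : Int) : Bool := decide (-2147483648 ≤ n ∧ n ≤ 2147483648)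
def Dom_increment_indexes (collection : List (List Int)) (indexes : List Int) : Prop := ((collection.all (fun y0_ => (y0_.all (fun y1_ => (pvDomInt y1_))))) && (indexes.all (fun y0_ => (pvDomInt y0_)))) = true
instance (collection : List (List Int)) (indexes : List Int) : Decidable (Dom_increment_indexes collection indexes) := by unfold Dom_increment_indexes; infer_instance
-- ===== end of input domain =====

-- B replaces A's depth recursion by a single descent loop to the parent of the
-- last index followed by one increment step (objective: simpler/alternative).

-- ===== PORT A =====
-- A is a polymorphic recursion over nesting depth; at the Lean types it is
-- monomorphised into an outer copy (on List (List Int)) and an inner copy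
-- (on List Int), each a literal transliteration of the same Python code.
-- first_indexes on an inner List Int: elements are Int, never NonStrSequence.
def firstIndexesInner (c : List Int) : List Int :=
  match c with
  | [] => []
  | _ :: _ => [0]

-- inner copy of increment_indexes, acting on a List Int.
-- len(indexes) > 1 would index into an Int (TypeError): outside Pre_, return [].
def incrementInner (c : List Int) (indexes : List Int) : List Int :=
  match indexes with
  | [] => []            -- assert failure / RuntimeError: outside Pre_
  | [i] =>
    let nxt := i + 1
    if nxt ≥ (c.length : Int) then []
    else
      match PySem.List.pyGet? c nxt with
      | some _ => [nxt]  -- an Int is not a NonStrSequence: no first_indexes tail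
      | none => []       -- IndexError: outside Pre_
  | _ :: _ :: _ => []    -- TypeError deeper down: outside Pre_

def increment_indexes (collection : List (List Int)) (indexes : List Int) : List Int :=
  match indexes with
  | [] => []             -- assert failure: outside Pre_
  | [i] =>
    let nxt := i + 1
    if nxt ≥ (collection.length : Int) then []
    else
      match PySem.List.pyGet? collection nxt with
      | some inner => nxt :: firstIndexesInner inner   -- inner list IS a NonStrSequence
      | none => []       -- IndexError: outside Pre_
  | i :: rest =>
    indexes.take 1 ++
      (match PySem.List.pyGet? collection i with
       | some inner => incrementInner inner rest
       | none => [])     -- IndexError: outside Pre_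

-- ===== PORT B =====
-- A descended-to value: level-2 list, level-1 list, or a bare Int.
inductive PyCol where
  | c2 : List (List Int) → PyCol
  | c1 : List Int → PyCol
  | c0 : Int → PyCol
deriving DecidableEq, Repr

-- col[i] during the descent loop (none = IndexError/TypeError)
def colGet? : PyCol → Int → Option PyCol
  | .c2 xs, i => (PySem.List.pyGet? xs i).map .c1
  | .c1 xs, i => (PySem.List.pyGet? xs i).map .c0
  | .c0 _, _ => none

-- len(col) (none = TypeError on an Int)
def colLen? : PyCol → Option Nat
  | .c2 xs => some xs.length
  | .c1 xs => some xs.length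
  | .c0 _ => none

-- first_indexes(child) if isinstance(child, NonStrSequence) else []
def colTail : PyCol → List Int
  | .c2 xs => match xs with
              | [] => []
              | y :: _ => 0 :: (match y with | [] => [] | _ :: _ => [0])
  | .c1 xs => match xs with
              | [] => []
              | _ :: _ => [0]
  | .c0 _ => []

def increment_indexes_alt (collection : List (List Int)) (indexes : List Int) : List Int :=
  match indexes with
  | [] => []             -- assert failure: outside Pre_
  | _ :: _ =>
    let pre := indexes.dropLast
    let colO := pre.foldl (fun acc i => acc.bind (fun c => colGet? c i))
                          (some (PyCol.c2 collection))
    match colO with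
    | none => []         -- descent raised: outside Pre_
    | some col =>
      let nxt := (indexes.getLast?.getD 0) + 1
      match colLen? col with
      | none => []       -- TypeError: outside Pre_
      | some len =>
        if nxt ≥ (len : Int) then pre
        else
          match colGet? col nxt with
          | none => []   -- IndexError: outside Pre_
          | some child => pre ++ nxt :: colTail child

-- ===== PRECONDITION & SPEC =====
-- Pre_ admits exactly the inputs on which Python A returns normally: indexes of
-- length 1 or 2 (empty fails the assert; length ≥ 3 descends into an Int and
-- raises TypeError), with every performed list access in Python range.
def Pre_increment_indexes (collection : List (List Int)) (indexes : List Int) : Prop :=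
  let i := indexes.headD 0
  let j := indexes.getD 1 0
  (indexes.length = 1 ∧
     (i + 1 ≥ (collection.length : Int) ∨ -(collection.length : Int) ≤ i + 1)) ∨
  (indexes.length = 2 ∧ (PySem.List.pyGet? collection i).isSome = true ∧
     (j + 1 ≥ (((PySem.List.pyGet? collection i).getD []).length : Int) ∨
      -(((PySem.List.pyGet? collection i).getD []).length : Int) ≤ j + 1))
instance (collection : List (List Int)) (indexes : List Int) : Decidable (Pre_increment_indexes collection indexes) := by
  unfold Pre_increment_indexes; infer_instance

def pvWitness_increment_indexes : List (List Int) × List Int := ([[1, 2], [3]], [0, 1])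

def Spec_increment_indexes (collection : List (List Int)) (indexes : List Int) (out : List Int) : Prop := out = increment_indexes_alt collection indexes
instance (collection : List (List Int)) (indexes : List Int) (out : List Int) : Decidable (Spec_increment_indexes collection indexes out) := by unfold Spec_increment_indexes; infer_instance

-- ===== CLAIM (what is proved, stated in full; the proofs are below) =====
def Claim_equal_increment_indexes : Prop := ∀ (collection : List (List Int)) (indexes : List Int), Dom_increment_indexes collection indexes → Pre_increment_indexes collection indexes → Spec_increment_indexes collection indexes (increment_indexes collection indexes)

-- ===== LEMMAS AND PROOFS =====

theorem inc_eq_len1 (c : List (List Int)) (i : Int)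
    (h : i + 1 ≥ (c.length : Int) ∨ -(c.length : Int) ≤ i + 1) :
    increment_indexes c [i] = increment_indexes_alt c [i] := by
  have hlast : ([i].getLast?.getD 0) = i := rfl
  simp only [increment_indexes, increment_indexes_alt, List.dropLast, List.foldl,
    hlast, colLen?, colGet?]
  by_cases hge : i + 1 ≥ (c.length : Int)
  · simp [hge]
  · simp only [if_neg hge]
    have hlo : -(c.length : Int) ≤ i + 1 := by omega
    have hs : (PySem.List.pyGet? c (i + 1)).isSome = true := by
      simp [Option.isSome_iff_ne_none, ne_eq, PySem.List.pyGet?_eq_none_iff, PySem.Raise.InRange]; omega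
    obtain ⟨inner, hi⟩ := Option.isSome_iff_exists.mp hs
    simp only [hi, Option.map_some]
    cases inner <;> rfl

theorem inc_eq_len2 (c : List (List Int)) (i j : Int) (inner : List Int)
    (hi : PySem.List.pyGet? c i = some inner)
    (h : j + 1 ≥ (inner.length : Int) ∨ -(inner.length : Int) ≤ j + 1) :
    increment_indexes c [i, j] = increment_indexes_alt c [i, j] := by
  have hlast : ([i, j].getLast?.getD 0) = j := rfl
  simp only [increment_indexes, increment_indexes_alt, incrementInner,
    List.dropLast, List.foldl, hlast, hi, Option.bind, colGet?,
    Option.map_some, colLen?, List.take]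
  by_cases hge : j + 1 ≥ (inner.length : Int)
  · simp [hge]
  · simp only [if_neg hge]
    have hlo : -(inner.length : Int) ≤ j + 1 := by omega
    have hs : (PySem.List.pyGet? inner (j + 1)).isSome = true := by
      simp [Option.isSome_iff_ne_none, ne_eq, PySem.List.pyGet?_eq_none_iff, PySem.Raise.InRange]; omega
    obtain ⟨v, hv⟩ := Option.isSome_iff_exists.mp hs
    simp only [hv, Option.map_some]
    rfl

-- ===== VERDICT (by name: the statement is the Claim_ definition above) =====
theorem increment_indexes_spec : Claim_equal_increment_indexes := by
  intro c idx _ hpre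
  unfold Spec_increment_indexes
  rcases hpre with ⟨hlen, hcond⟩ | ⟨hlen, hsome, hcond⟩
  · match idx, hlen with
    | [i], _ => exact inc_eq_len1 c i hcond
  · match idx, hlen with
    | [i, j], _ =>
      simp only [List.headD, List.getD, List.getElem?_cons_succ,
        List.getElem?_cons_zero, Option.getD_some] at hsome hcond
      obtain ⟨inner, hi⟩ := Option.isSome_iff_exists.mp hsome
      rw [hi] at hcond
      exact inc_eq_len2 c i j inner hi (by simpa using hcond)
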